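-- pv_equiv track=rewrite | github.com/ashersamuel8/Design-and-Analysis-of-Algorithms | 2.py | max_prod_crossing
-- ===== SOURCE A (Python) =====
-- def max_prod_crossing(A, low, mid, high):
--     left_prod = 0
--     prod = 1
--     max_left = None
--     for i in range(mid, low - 1, -1):
--         prod = prod * A[i]
--         if prod > left_prod:
--             left_prod = prod
--             max_left = i
--
--     right_prod = 0
--     prod = 1
--     max_right = None
--     for j in range(mid + 1, high + 1):
--         prod = prod * A[j]
--         if prod > right_prod:
--             right_prod = prod
--             max_right = j
--
--     return max_left, max_right, left_prod * right_prod
-- ===== SOURCE B (Python) =====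
-- def max_prod_crossing(A, low, mid, high):
--     def running(indices):
--         p = 1
--         for i in indices:
--             p = p * A[i]
--             yield p, i
--
--     def select(indices):
--         best = max((p for (p, _) in running(indices) if p > 0), default=None)
--         if best is None:
--             return None, 0
--         idx = next(i for (p, i) in running(indices) if p == best)
--         return idx, best
--
--     max_left, left_prod = select(range(mid, low - 1, -1))
--     max_right, right_prod = select(range(mid + 1, high + 1))
--     return max_left, max_right, left_prod * right_prod
-- ===== Notes on version B (the rewrite author's own statement) =====
-- stated objective: alternative
-- what changed: Replaces A's fused loop (running product, best-so-far and argmax updated together) by separate shaped passes per side over the running-product sequence: one pass selects the maximal positive running product, a second pass finds the first index attaining it.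
import Mathlib
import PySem

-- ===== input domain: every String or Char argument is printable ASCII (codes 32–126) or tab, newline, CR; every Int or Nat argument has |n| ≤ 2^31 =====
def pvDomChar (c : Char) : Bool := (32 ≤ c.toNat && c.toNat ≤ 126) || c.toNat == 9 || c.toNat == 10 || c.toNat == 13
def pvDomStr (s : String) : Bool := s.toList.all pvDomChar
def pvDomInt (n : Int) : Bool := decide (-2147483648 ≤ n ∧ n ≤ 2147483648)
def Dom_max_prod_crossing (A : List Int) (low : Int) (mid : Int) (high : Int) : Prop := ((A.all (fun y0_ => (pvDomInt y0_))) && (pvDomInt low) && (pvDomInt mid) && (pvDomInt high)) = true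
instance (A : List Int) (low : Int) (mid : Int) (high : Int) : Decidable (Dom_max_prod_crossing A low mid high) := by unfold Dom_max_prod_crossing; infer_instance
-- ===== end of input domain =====

-- B separates A's fused loop into an accumulate pass (running products with indices)
-- followed by a select pass (max positive product, first index attaining it); same cost,
-- different decomposition.  Equivalence is about the return value; neither mutates A.

-- ===== PORT A =====
-- literal transliteration of A: one fold per side over the index range,
-- state (left_prod/right_prod, prod, max_left/max_right)
def max_prod_crossing (A : List Int) (low : Int) (mid : Int) (high : Int) : Option Int × Option Int × Int :=
  let left := (PySem.List.pyRange mid (low - 1) (-1)).foldl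
    (fun (st : Int × Int × Option Int) i =>
      let p := st.2.1 * PySem.List.pyGetD A i 0
      if st.1 < p then (p, p, some i) else (st.1, p, st.2.2)) (0, 1, none)
  let right := (PySem.List.pyRange (mid + 1) (high + 1) 1).foldl
    (fun (st : Int × Int × Option Int) j =>
      let p := st.2.1 * PySem.List.pyGetD A j 0
      if st.1 < p then (p, p, some j) else (st.1, p, st.2.2)) (0, 1, none)
  (left.2.2, right.2.2, left.1 * right.1)

-- ===== PORT B =====
-- Source B's running(): append loop building the (product, index) list
def pvRunning (A : List Int) (idxs : List Int) : List (Int × Int) :=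
  (idxs.foldl
    (fun (st : List (Int × Int) × Int) i =>
      let p := st.2 * PySem.List.pyGetD A i 0
      (st.1 ++ [(p, i)], p)) ([], 1)).1

-- Source B's select(): filter positives, max, first index attaining it
def pvSelect (prods : List (Int × Int)) : Option Int × Int :=
  let cands := (prods.filter (fun x => decide (0 < x.1))).map Prod.fst
  match cands.max? with
  | none => (none, 0)
  | some bp => ((prods.find? (fun x => x.1 == bp)).map Prod.snd, bp)

def max_prod_crossing_alt (A : List Int) (low : Int) (mid : Int) (high : Int) : Option Int × Option Int × Int :=
  let l := pvSelect (pvRunning A (PySem.List.pyRange mid (low - 1) (-1)))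
  let r := pvSelect (pvRunning A (PySem.List.pyRange (mid + 1) (high + 1) 1))
  (l.1, r.1, l.2 * r.2)

-- ===== PRECONDITION & SPEC =====
-- Pre_ excludes exactly the inputs on which Python A raises IndexError: some visited
-- index (mid..low on the left, mid+1..high on the right) is outside [-len(A), len(A)).
def Pre_max_prod_crossing (A : List Int) (low : Int) (mid : Int) (high : Int) : Prop :=
  (mid < low ∨ (-(A.length : Int) ≤ low ∧ mid < (A.length : Int))) ∧
  (high ≤ mid ∨ (-(A.length : Int) ≤ mid + 1 ∧ high < (A.length : Int)))
instance (A : List Int) (low : Int) (mid : Int) (high : Int) : Decidable (Pre_max_prod_crossing A low mid high) := by unfold Pre_max_prod_crossing; infer_instance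

def pvWitness_max_prod_crossing : List Int × Int × Int × Int := ([2, 3, 1, 4], 0, 1, 3)

def Spec_max_prod_crossing (A : List Int) (low : Int) (mid : Int) (high : Int) (out : Option Int × Option Int × Int) : Prop := out = max_prod_crossing_alt A low mid high
instance (A : List Int) (low : Int) (mid : Int) (high : Int) (out : Option Int × Option Int × Int) : Decidable (Spec_max_prod_crossing A low mid high out) := by unfold Spec_max_prod_crossing; infer_instance

-- ===== CLAIM (what is proved, stated in full; the proofs are below) =====
def Claim_equal_max_prod_crossing : Prop := ∀ (A : List Int) (low : Int) (mid : Int) (high : Int), Dom_max_prod_crossing A low mid high → Pre_max_prod_crossing A low mid high → Spec_max_prod_crossing A low mid high (max_prod_crossing A low mid high)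

-- ===== LEMMAS AND PROOFS =====

-- running products over a list of (factor, index) pairs, starting from accumulator p
def pvScan (p : Int) : List (Int × Int) → List (Int × Int)
  | [] => []
  | (a, i) :: t => (p * a, i) :: pvScan (p * a) t

-- A's fused selection loop over (value, index) pairs
def pvBestF (b : Int) (ix : Option Int) : List (Int × Int) → Int × Option Int
  | [] => (b, ix)
  | (v, i) :: t => if b < v then pvBestF v (some i) t else pvBestF b ix t

theorem pvRunning_foldl_eq (A : List Int) :
    ∀ (idxs : List Int) (acc : List (Int × Int)) (p : Int),
      (idxs.foldl
        (fun (st : List (Int × Int) × Int) i =>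
          let q := st.2 * PySem.List.pyGetD A i 0
          (st.1 ++ [(q, i)], q)) (acc, p)).1
        = acc ++ pvScan p (idxs.map (fun i => (PySem.List.pyGetD A i 0, i))) := by
  intro idxs
  induction idxs with
  | nil => intro acc p; simp [pvScan]
  | cons i t ih =>
      intro acc p
      simp only [List.foldl_cons, List.map_cons, pvScan]
      rw [ih]
      simp

theorem pvLoop_eq_bestF (A : List Int) :
    ∀ (idxs : List Int) (b p : Int) (ix : Option Int),
      (((idxs.foldl
        (fun (st : Int × Int × Option Int) i =>
          let q := st.2.1 * PySem.List.pyGetD A i 0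
          if st.1 < q then (q, q, some i) else (st.1, q, st.2.2)) (b, p, ix))).1,
       ((idxs.foldl
        (fun (st : Int × Int × Option Int) i =>
          let q := st.2.1 * PySem.List.pyGetD A i 0
          if st.1 < q then (q, q, some i) else (st.1, q, st.2.2)) (b, p, ix))).2.2)
      = pvBestF b ix (pvScan p (idxs.map (fun i => (PySem.List.pyGetD A i 0, i)))) := by
  intro idxs
  induction idxs with
  | nil => intro b p ix; simp [pvBestF, pvScan]
  | cons i t ih =>
      intro b p ix
      simp only [List.foldl_cons, List.map_cons, pvScan, pvBestF]
      by_cases h : b < p * PySem.List.pyGetD A i 0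
      · simp only [h]
        exact ih _ _ _
      · simp only [h]
        exact ih _ _ _

theorem pvFoldl_max_filter_congr :
    ∀ (L : List Int) (acc b c : Int), b ≤ c → c ≤ acc →
      (L.filter (fun x => decide (b < x))).foldl max acc
        = (L.filter (fun x => decide (c < x))).foldl max acc := by
  intro L
  induction L with
  | nil => intro acc b c _ _; rfl
  | cons x t ih =>
      intro acc b c hbc hca
      by_cases hcx : c < x
      · have hbx : b < x := lt_of_le_of_lt hbc hcx
        simp only [List.filter_cons, hbx, hcx, decide_true, if_true, List.foldl_cons]
        exact ih (max acc x) b c hbc (le_trans (le_of_lt hcx) (le_max_right acc x))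
      · by_cases hbx : b < x
        · simp only [List.filter_cons, hbx, hcx, decide_true, decide_false,
            Bool.false_eq_true, if_true, if_false, List.foldl_cons]
          rw [max_eq_left (le_trans (not_lt.mp hcx) hca)]
          exact ih acc b c hbc hca
        · simp only [List.filter_cons, hbx, hcx, decide_false, Bool.false_eq_true, if_false]
          exact ih acc b c hbc hca

theorem pvFoldl_max_eq_max? :
    ∀ (L : List Int) (v : Int), (∀ x ∈ L, v < x) →
      L.foldl max v = (L.max?).getD v := by
  intro L
  cases L with
  | nil => intro v _; rfl
  | cons y ys =>
      intro v h
      have hv : max v y = y := max_eq_right (le_of_lt (h y (by simp)))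
      simp [hv, List.max?]

theorem pvBestF_char :
    ∀ (vals : List (Int × Int)) (b : Int) (ix : Option Int),
      pvBestF b ix vals =
        match ((vals.filter (fun x => decide (b < x.1))).map Prod.fst).max? with
        | none => (b, ix)
        | some m => (m, (vals.find? (fun x => x.1 == m)).map Prod.snd) := by
  intro vals
  induction vals with
  | nil => intro b ix; rfl
  | cons hd t ih =>
      intro b ix
      obtain ⟨v, i⟩ := hd
      by_cases hb : b < v
      · -- head is kept
        have hmem : ∀ x ∈ (t.filter (fun x => decide (v < x.1))).map Prod.fst, v < x := by
          intro x hx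
          simp only [List.mem_map, List.mem_filter, decide_eq_true_eq] at hx
          obtain ⟨⟨a, j⟩, ⟨_, hlt⟩, rfl⟩ := hx
          exact hlt
        have hfilter : ((v, i) :: t).filter (fun x => decide (b < x.1))
            = (v, i) :: t.filter (fun x => decide (b < x.1)) := by
          simp [hb]
        rw [pvBestF, if_pos hb, ih v (some i), hfilter]
        simp only [List.map_cons, List.max?_cons']
        -- scrutinee on RHS: some (foldl max v (kept-tail with threshold b))
        have hcongr := pvFoldl_max_filter_congr (t.map Prod.fst) v b v (le_of_lt hb) le_rfl
        have hmapfil : ∀ (c : Int), (t.filter (fun x => decide (c < x.1))).map Prod.fst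
            = (t.map Prod.fst).filter (fun x => decide (c < x)) := by
          intro c; rw [List.filter_map]; rfl
        rw [show ((t.filter (fun x => decide (b < x.1))).map Prod.fst).foldl max v
              = ((t.filter (fun x => decide (v < x.1))).map Prod.fst).foldl max v by
            rw [hmapfil, hmapfil]; exact hcongr]
        rw [pvFoldl_max_eq_max? _ v hmem]
        cases hmax : ((t.filter (fun x => decide (v < x.1))).map Prod.fst).max? with
        | none =>
            have hfind : List.find? (fun x => x.1 == v) ((v, i) :: t) = some (v, i) :=
              List.find?_cons_of_pos (by simp)
            simp [hfind]
        | some m =>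
            have hvm : v < m := hmem m (List.max?_mem hmax)
            have hfind : List.find? (fun x => x.1 == m) ((v, i) :: t)
                = List.find? (fun x => x.1 == m) t :=
              List.find?_cons_of_neg (by simp [ne_of_lt hvm])
            simp [hfind]
      · -- head is dropped
        have hfilter : ((v, i) :: t).filter (fun x => decide (b < x.1))
            = t.filter (fun x => decide (b < x.1)) := by
          simp [hb]
        rw [pvBestF, if_neg hb, ih b ix, hfilter]
        cases hmax : ((t.filter (fun x => decide (b < x.1))).map Prod.fst).max? with
        | none => rfl
        | some m =>
            have hbm : b < m := by
              have hm := List.max?_mem hmax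
              simp only [List.mem_map, List.mem_filter, decide_eq_true_eq] at hm
              obtain ⟨⟨a, j⟩, ⟨_, hlt⟩, rfl⟩ := hm
              exact hlt
            have hvm : v ≠ m := fun h => hb (h ▸ hbm)
            have hfind : List.find? (fun x => x.1 == m) ((v, i) :: t)
                = List.find? (fun x => x.1 == m) t :=
              List.find?_cons_of_neg (by simp [hvm])
            simp [hfind]

-- B's select equals A's fused selection loop (swapped components)
theorem pvSelect_eq_bestF (vals : List (Int × Int)) :
    pvSelect vals = ((pvBestF 0 none vals).2, (pvBestF 0 none vals).1) := by
  rw [pvBestF_char vals 0 none]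
  unfold pvSelect
  cases hmax : ((vals.filter (fun x => decide (0 < x.1))).map Prod.fst).max? with
  | none => simp [hmax]
  | some m => simp [hmax]

theorem pvSides_eq (A : List Int) (idxs : List Int) :
    pvSelect (pvRunning A idxs)
      = (((idxs.foldl
          (fun (st : Int × Int × Option Int) i =>
            let q := st.2.1 * PySem.List.pyGetD A i 0
            if st.1 < q then (q, q, some i) else (st.1, q, st.2.2)) (0, 1, none))).2.2,
         ((idxs.foldl
          (fun (st : Int × Int × Option Int) i =>
            let q := st.2.1 * PySem.List.pyGetD A i 0
            if st.1 < q then (q, q, some i) else (st.1, q, st.2.2)) (0, 1, none))).1) := by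
  have hrun : pvRunning A idxs
      = pvScan 1 (idxs.map (fun i => (PySem.List.pyGetD A i 0, i))) := by
    unfold pvRunning
    rw [pvRunning_foldl_eq A idxs [] 1]
    simp
  have hloop := pvLoop_eq_bestF A idxs 0 1 none
  rw [hrun, pvSelect_eq_bestF, ← hloop]

-- ===== VERDICT (by name: the statement is the Claim_ definition above) =====
theorem max_prod_crossing_spec : Claim_equal_max_prod_crossing := by
  intro A low mid high _ _
  show max_prod_crossing A low mid high = max_prod_crossing_alt A low mid high
  unfold max_prod_crossing max_prod_crossing_alt
  rw [pvSides_eq A, pvSides_eq A]
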